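-- pv_equiv track=rewrite | github.com/kissdevil/illuminator-spark | src/main/python/crfpyspark-streaming.py | trigram
-- ===== SOURCE A (Python) =====
-- def trigram(stringList, brandDict):
--     if len(stringList) < 3:
--         return bigram(stringList, brandDict)
--     for i in range(len(stringList) - 2):
--         if ' '.join([stringList[i], stringList[i + 1], stringList[i + 2]]) in brandDict:
--             # print (' '.join([stringList[i], stringList[i+1], stringList[i+2]]))
--             if i == len(stringList) - 3:  # if i is third to last word
--                 return (bigram(stringList[0:i], brandDict) + ' ' + brandDict[
--                     ' '.join([stringList[i], stringList[i + 1], stringList[i + 2]])]).strip()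
--             else:
--                 return (bigram(stringList[0:i], brandDict) + ' ' + brandDict[
--                     ' '.join([stringList[i], stringList[i + 1], stringList[i + 2]])] + ' ' + trigram(stringList[i + 3:],
--                                                                                                      brandDict)).strip()
--     return bigram(stringList, brandDict)
--
-- def bigram(stringList, brandDict):
--     if len(stringList) < 2:
--         return unigram(stringList, brandDict)
--     for i in range(len(stringList) - 1):
--         if ' '.join([stringList[i], stringList[i + 1]]) in brandDict:
--             # print (' '.join([stringList[i], stringList[i+1]]))
--             if i == len(stringList) - 2:  # if i is the second to last word
--                 return (unigram(stringList[0:i], brandDict) + ' ' + brandDict[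
--                     ' '.join([stringList[i], stringList[i + 1]])]).strip()
--             else:
--                 return (unigram(stringList[0:i], brandDict) + ' ' + brandDict[
--                     ' '.join([stringList[i], stringList[i + 1]])] + ' ' + bigram(stringList[i + 2:], brandDict)).strip()
--     return unigram(stringList, brandDict)
--
-- def unigram(stringList, brandDict):
--     res = ''
--     for s in stringList:
--         if s in brandDict:
--             res = res + brandDict[s] + ' '
--         else:
--             res = res + s + ' '
--     return (res.strip())
-- ===== SOURCE B (Python) =====
-- # B: iterative re-implementation — each n-gram level finds the whole leftmost-match
-- # segmentation with a while-loop, then assembles the result by a single reversed fold,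
-- # instead of A's nested recursion.
--
-- def trigram(stringList, brandDict):
--     segs = []
--     cur = stringList
--     while True:
--         found = None
--         for i in range(len(cur) - 2):
--             if ' '.join([cur[i], cur[i + 1], cur[i + 2]]) in brandDict:
--                 found = i
--                 break
--         if found is None:
--             res = _bigram_flat(cur, brandDict)
--             break
--         segs.append((_bigram_flat(cur[:found], brandDict),
--                      brandDict[' '.join([cur[found], cur[found + 1], cur[found + 2]])]))
--         cur = cur[found + 3:]
--     for p, r in reversed(segs):
--         res = (p + ' ' + r + ' ' + res).strip()
--     return res
--
--
-- def _bigram_flat(L, brandDict):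
--     segs = []
--     cur = L
--     while True:
--         found = None
--         for i in range(len(cur) - 1):
--             if ' '.join([cur[i], cur[i + 1]]) in brandDict:
--                 found = i
--                 break
--         if found is None:
--             res = _unigram_flat(cur, brandDict)
--             break
--         segs.append((_unigram_flat(cur[:found], brandDict),
--                      brandDict[' '.join([cur[found], cur[found + 1]])]))
--         cur = cur[found + 2:]
--     for p, r in reversed(segs):
--         res = (p + ' ' + r + ' ' + res).strip()
--     return res
--
--
-- def _unigram_flat(L, brandDict):
--     return ' '.join(brandDict[s] if s in brandDict else s for s in L).strip()
-- ===== Notes on version B (the rewrite author's own statement) =====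
-- stated objective: faster
-- what changed: A's nested recursion (trigram/bigram recursing on the suffix after each leftmost match, re-concatenating and re-stripping the whole tail string at every level) is replaced by iteration: each n-gram level collects the whole leftmost-match segmentation with a while-loop and assembles the answer by one reversed fold, with the unigram level a single join over a comprehension.
import Mathlib
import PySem

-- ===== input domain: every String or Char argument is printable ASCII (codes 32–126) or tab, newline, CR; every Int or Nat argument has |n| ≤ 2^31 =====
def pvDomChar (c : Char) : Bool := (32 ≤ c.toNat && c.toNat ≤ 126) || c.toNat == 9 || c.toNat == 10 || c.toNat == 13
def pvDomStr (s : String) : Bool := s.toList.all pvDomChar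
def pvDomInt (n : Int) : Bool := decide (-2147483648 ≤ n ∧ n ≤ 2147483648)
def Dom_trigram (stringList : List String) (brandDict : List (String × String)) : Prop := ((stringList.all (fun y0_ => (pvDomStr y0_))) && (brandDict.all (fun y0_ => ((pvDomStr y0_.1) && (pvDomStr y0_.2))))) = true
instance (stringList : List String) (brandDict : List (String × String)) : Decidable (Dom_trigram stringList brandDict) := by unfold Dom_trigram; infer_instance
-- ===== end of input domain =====

-- Both ports work on List Char (PySem.Chars) internally and convert the inputs once at the
-- top level; dict lookups use PySem.Dict over List Char keys (first-match lookup, per the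
-- association-list convention). Python slices stringList[0:i] / stringList[i+k:] have
-- non-negative in-range bounds here, so List.take / List.drop are exact for them.

-- ===== PORT A =====
-- A's unigram: accumulate 'res = res + tok + " "' over the words, then strip.
def pvUniA (L : List (List Char)) (d : PySem.Dict (List Char) (List Char)) : List Char :=
  PySem.Chars.strip (L.foldl (fun res s =>
    match d.get? s with
    | some v => res ++ v ++ [' ']
    | none   => res ++ s ++ [' ']) [])

-- A's bigram: leftmost matching pair, recurse on the suffix (dite guard only for totality).
def pvBiA (L : List (List Char)) (d : PySem.Dict (List Char) (List Char)) : List Char :=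
  if L.length < 2 then pvUniA L d
  else
    match (List.range (L.length - 1)).find?
        (fun i => (d.get? (PySem.Chars.join [' '] [L.getD i [], L.getD (i+1) []])).isSome) with
    | none => pvUniA L d
    | some i =>
      let r := (d.get? (PySem.Chars.join [' '] [L.getD i [], L.getD (i+1) []])).getD []
      if i = L.length - 2 then
        PySem.Chars.strip (pvUniA (L.take i) d ++ [' '] ++ r)
      else
        PySem.Chars.strip (pvUniA (L.take i) d ++ [' '] ++ r ++ [' '] ++ pvBiA (L.drop (i+2)) d)
termination_by L.length
decreasing_by simp; omega

-- A's trigram: leftmost matching triple, recurse on the suffix, bigram as fallback.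
def pvTriA (L : List (List Char)) (d : PySem.Dict (List Char) (List Char)) : List Char :=
  if L.length < 3 then pvBiA L d
  else
    match (List.range (L.length - 2)).find?
        (fun i => (d.get? (PySem.Chars.join [' '] [L.getD i [], L.getD (i+1) [], L.getD (i+2) []])).isSome) with
    | none => pvBiA L d
    | some i =>
      let r := (d.get? (PySem.Chars.join [' '] [L.getD i [], L.getD (i+1) [], L.getD (i+2) []])).getD []
      if i = L.length - 3 then
        PySem.Chars.strip (pvBiA (L.take i) d ++ [' '] ++ r)
      else
        PySem.Chars.strip (pvBiA (L.take i) d ++ [' '] ++ r ++ [' '] ++ pvTriA (L.drop (i+3)) d)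
termination_by L.length
decreasing_by simp; omega

def trigram (stringList : List String) (brandDict : List (String × String)) : String :=
  String.ofList (pvTriA (stringList.map String.toList)
    (PySem.Dict.mk (brandDict.map (fun p => (p.1.toList, p.2.toList)))))

-- ===== PORT B =====
-- B's unigram: one join over the token comprehension, then strip.
def pvUniB (L : List (List Char)) (d : PySem.Dict (List Char) (List Char)) : List Char :=
  PySem.Chars.strip (PySem.Chars.join [' '] (L.map (fun s =>
    match d.get? s with
    | some v => v
    | none   => s)))

-- B's bigram while-loop, first half: collect the (prefix-string, replacement) segments and
-- the final base string (dite guard only for totality; the loop's range is empty below 2).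
def pvSegsBi (L : List (List Char)) (d : PySem.Dict (List Char) (List Char)) :
    List (List Char × List Char) × List Char :=
  if L.length < 2 then ([], pvUniB L d)
  else
    match (List.range (L.length - 1)).find?
        (fun i => (d.get? (PySem.Chars.join [' '] [L.getD i [], L.getD (i+1) []])).isSome) with
    | none => ([], pvUniB L d)
    | some i =>
      let r := (d.get? (PySem.Chars.join [' '] [L.getD i [], L.getD (i+1) []])).getD []
      let rest := pvSegsBi (L.drop (i+2)) d
      ((pvUniB (L.take i) d, r) :: rest.1, rest.2)
termination_by L.length
decreasing_by simp; omega

-- B's bigram, second half: 'for p, r in reversed(segs): res = (p+' '+r+' '+res).strip()'.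
def pvBiB (L : List (List Char)) (d : PySem.Dict (List Char) (List Char)) : List Char :=
  let sb := pvSegsBi L d
  sb.1.reverse.foldl (fun res pr => PySem.Chars.strip (pr.1 ++ [' '] ++ pr.2 ++ [' '] ++ res)) sb.2

-- B's trigram while-loop: segments, with B's bigram filling the gaps and the base.
def pvSegsTri (L : List (List Char)) (d : PySem.Dict (List Char) (List Char)) :
    List (List Char × List Char) × List Char :=
  if L.length < 3 then ([], pvBiB L d)
  else
    match (List.range (L.length - 2)).find?
        (fun i => (d.get? (PySem.Chars.join [' '] [L.getD i [], L.getD (i+1) [], L.getD (i+2) []])).isSome) with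
    | none => ([], pvBiB L d)
    | some i =>
      let r := (d.get? (PySem.Chars.join [' '] [L.getD i [], L.getD (i+1) [], L.getD (i+2) []])).getD []
      let rest := pvSegsTri (L.drop (i+3)) d
      ((pvBiB (L.take i) d, r) :: rest.1, rest.2)
termination_by L.length
decreasing_by simp; omega

def pvTriB (L : List (List Char)) (d : PySem.Dict (List Char) (List Char)) : List Char :=
  let sb := pvSegsTri L d
  sb.1.reverse.foldl (fun res pr => PySem.Chars.strip (pr.1 ++ [' '] ++ pr.2 ++ [' '] ++ res)) sb.2

def trigram_alt (stringList : List String) (brandDict : List (String × String)) : String :=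
  String.ofList (pvTriB (stringList.map String.toList)
    (PySem.Dict.mk (brandDict.map (fun p => (p.1.toList, p.2.toList)))))

-- ===== PRECONDITION & SPEC =====
def Spec_trigram (stringList : List String) (brandDict : List (String × String)) (out : String) : Prop := out = trigram_alt stringList brandDict
instance (stringList : List String) (brandDict : List (String × String)) (out : String) : Decidable (Spec_trigram stringList brandDict out) := by unfold Spec_trigram; infer_instance

-- ===== CLAIM (what is proved, stated in full; the proofs are below) =====
def Claim_equal_trigram : Prop := ∀ (stringList : List String) (brandDict : List (String × String)), Dom_trigram stringList brandDict → Spec_trigram stringList brandDict (trigram stringList brandDict)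

-- ===== LEMMAS AND PROOFS =====

theorem pv_lstrip_append (x y : List Char) :
    PySem.Chars.lstrip (x ++ y) =
      if PySem.Chars.lstrip x = [] then PySem.Chars.lstrip y else PySem.Chars.lstrip x ++ y := by
  induction x with
  | nil => simp [PySem.Chars.lstrip]
  | cons c t ih =>
    simp only [PySem.Chars.lstrip, List.cons_append, List.dropWhile_cons] at *
    by_cases h : PySem.Chars.isspace c = true <;> simp [h, ih]

theorem pv_rstrip_append_space (x : List Char) :
    PySem.Chars.rstrip (x ++ [' ']) = PySem.Chars.rstrip x := by
  have hs : PySem.Chars.isspace ' ' = true := by decide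
  simp [PySem.Chars.rstrip, hs]

theorem pv_strip_append_space (x : List Char) :
    PySem.Chars.strip (x ++ [' ']) = PySem.Chars.strip x := by
  simp only [PySem.Chars.strip, pv_lstrip_append]
  by_cases h : PySem.Chars.lstrip x = []
  · rw [if_pos h, h]
    decide
  · rw [if_neg h, pv_rstrip_append_space]

theorem pv_flatMap_space (L : List (List Char)) (h : L ≠ []) :
    L.flatMap (fun t => t ++ [' ']) = List.intercalate [' '] L ++ [' '] := by
  induction L with
  | nil => simp at h
  | cons t rest ih =>
    cases rest with
    | nil => simp [List.intercalate]
    | cons u rs =>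
      simp only [List.flatMap_cons, ih (by simp)]
      simp [List.intercalate, List.intersperse]

theorem pv_uni_eq (L : List (List Char)) (d : PySem.Dict (List Char) (List Char)) :
    pvUniA L d = pvUniB L d := by
  unfold pvUniA pvUniB
  have hfold : (L.foldl (fun res s =>
      match d.get? s with
      | some v => res ++ v ++ [' ']
      | none   => res ++ s ++ [' ']) []) =
      L.foldl (fun res s => res ++ ((match d.get? s with
      | some v => v
      | none   => s) ++ [' '])) [] := by
    congr 1
    funext res s
    cases d.get? s <;> simp
  rw [hfold, PySem.List.foldl_append_eq_flatMap, List.nil_append,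
    ← List.flatMap_map _ (fun t => t ++ [' ']) L]
  cases hL : L with
  | nil => simp
  | cons a t =>
    rw [pv_flatMap_space _ (by simp), pv_strip_append_space]
    simp [PySem.Chars.join]

theorem pv_segsBi_nil (d : PySem.Dict (List Char) (List Char)) :
    pvSegsBi [] d = ([], []) := by
  rw [pvSegsBi]
  simp [pvUniB, PySem.Chars.join, List.intercalate, PySem.Chars.strip,
    PySem.Chars.lstrip, PySem.Chars.rstrip]

theorem pv_biB_nil (d : PySem.Dict (List Char) (List Char)) :
    pvBiB [] d = [] := by
  simp [pvBiB, pv_segsBi_nil]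

-- A's bigram equals the right fold of B's bigram segmentation.
theorem pv_bi_foldr (L : List (List Char)) (d : PySem.Dict (List Char) (List Char)) :
    pvBiA L d =
      (pvSegsBi L d).1.foldr
        (fun pr res => PySem.Chars.strip (pr.1 ++ [' '] ++ pr.2 ++ [' '] ++ res))
        (pvSegsBi L d).2 := by
  fun_induction pvBiA L d with
  | case1 L h =>
    rw [pvSegsBi, if_pos h]
    simp [pv_uni_eq]
  | case2 L h hfind =>
    rw [pvSegsBi, if_neg h, hfind]
    simp [pv_uni_eq]
  | case3 L h hfind r =>
    have hdrop : L.drop (L.length - 2 + 2) = [] :=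
      List.drop_eq_nil_iff.mpr (by omega)
    rw [pvSegsBi, if_neg h, hfind]
    simp only [hdrop, pv_segsBi_nil, List.foldr_cons, List.foldr_nil, List.append_nil]
    rw [pv_uni_eq, pv_strip_append_space]
  | case4 L h i hfind r hne ih =>
    rw [pvSegsBi, if_neg h, hfind]
    simp only [List.foldr_cons]
    rw [pv_uni_eq, ih]

theorem pv_bi_eq (L : List (List Char)) (d : PySem.Dict (List Char) (List Char)) :
    pvBiA L d = pvBiB L d := by
  rw [pvBiB, pv_bi_foldr]
  simp [List.foldl_reverse]

theorem pv_tri_foldr (L : List (List Char)) (d : PySem.Dict (List Char) (List Char)) :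
    pvTriA L d =
      (pvSegsTri L d).1.foldr
        (fun pr res => PySem.Chars.strip (pr.1 ++ [' '] ++ pr.2 ++ [' '] ++ res))
        (pvSegsTri L d).2 := by
  fun_induction pvTriA L d with
  | case1 L h =>
    rw [pvSegsTri, if_pos h]
    simp [pv_bi_eq]
  | case2 L h hfind =>
    rw [pvSegsTri, if_neg h, hfind]
    simp [pv_bi_eq]
  | case3 L h hfind r =>
    have hdrop : L.drop (L.length - 3 + 3) = [] :=
      List.drop_eq_nil_iff.mpr (by omega)
    rw [pvSegsTri, if_neg h, hfind]
    have hnil : pvSegsTri ([] : List (List Char)) d = ([], []) := by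
      rw [pvSegsTri]
      simp [pv_biB_nil]
    simp only [hdrop, hnil, List.foldr_cons, List.foldr_nil, List.append_nil]
    rw [pv_bi_eq, pv_strip_append_space]
  | case4 L h i hfind r hne ih =>
    rw [pvSegsTri, if_neg h, hfind]
    simp only [List.foldr_cons]
    rw [pv_bi_eq, ih]

theorem pv_tri_eq (L : List (List Char)) (d : PySem.Dict (List Char) (List Char)) :
    pvTriA L d = pvTriB L d := by
  rw [pvTriB, pv_tri_foldr]
  simp [List.foldl_reverse]

-- ===== VERDICT (by name: the statement is the Claim_ definition above) =====
theorem trigram_spec : Claim_equal_trigram := by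
  intro stringList brandDict _
  unfold Spec_trigram trigram trigram_alt
  rw [pv_tri_eq]
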